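-- pv_equiv track=rewrite | github.com/Dragon-Baby/MarkovPython | source/Helper.py | IndexBoolArray
-- ===== SOURCE A (Python) =====
-- def IndexBoolArray(array):
--     result = 0
--     power = 1
--     for i in range(len(array)):
--         if array[i]:
--             result += power
--         power *= 2
--     return result
-- ===== SOURCE B (Python) =====
-- def IndexBoolArray(array):
--     result = 0
--     for bit in reversed(array):
--         result = result * 2 + (1 if bit else 0)
--     return result
-- ===== Notes on version B (the rewrite author's own statement) =====
-- stated objective: simpler
-- what changed: Replaces the forward loop with an explicit power-of-two accumulator by Horner's method over the reversed array, keeping a single accumulator updated as result*2 + bit.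
import Mathlib
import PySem

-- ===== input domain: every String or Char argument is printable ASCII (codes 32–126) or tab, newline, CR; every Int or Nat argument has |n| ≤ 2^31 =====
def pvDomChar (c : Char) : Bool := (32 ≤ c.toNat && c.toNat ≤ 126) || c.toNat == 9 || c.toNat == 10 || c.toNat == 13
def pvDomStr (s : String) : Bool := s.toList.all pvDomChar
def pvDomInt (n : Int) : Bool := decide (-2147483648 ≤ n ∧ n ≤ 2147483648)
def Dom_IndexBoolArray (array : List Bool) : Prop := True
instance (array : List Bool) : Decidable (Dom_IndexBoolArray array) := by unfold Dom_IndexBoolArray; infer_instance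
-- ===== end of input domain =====

-- B: Horner's method over the reversed array (single accumulator, no power variable) — simpler.
-- ===== PORT A =====
def IndexBoolArray (array : List Bool) : Int :=
  (array.foldl (fun (s : Int × Int) b => (if b then s.1 + s.2 else s.1, s.2 * 2)) (0, 1)).1

-- ===== PORT B =====
def IndexBoolArray_alt (array : List Bool) : Int :=
  array.reverse.foldl (fun acc b => acc * 2 + (if b then 1 else 0)) 0

-- ===== PRECONDITION & SPEC =====
def Spec_IndexBoolArray (array : List Bool) (out : Int) : Prop := out = IndexBoolArray_alt array
instance (array : List Bool) (out : Int) : Decidable (Spec_IndexBoolArray array out) := by unfold Spec_IndexBoolArray; infer_instance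

-- ===== CLAIM (what is proved, stated in full; the proofs are below) =====
def Claim_equal_IndexBoolArray : Prop := ∀ (array : List Bool), Dom_IndexBoolArray array → Spec_IndexBoolArray array (IndexBoolArray array)

-- ===== LEMMAS AND PROOFS =====

-- ===== VERDICT (by name: the statement is the Claim_ definition above) =====
-- invariant of A's loop: result r with pending power p ends at r + p * (Horner value of xs)
theorem IndexBoolArray_loop (xs : List Bool) : ∀ r p : Int,
    (xs.foldl (fun (s : Int × Int) b => (if b then s.1 + s.2 else s.1, s.2 * 2)) (r, p)).1
      = r + p * xs.foldr (fun b a => a * 2 + (if b then 1 else 0)) 0 := by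
  induction xs with
  | nil => intro r p; simp
  | cons x xs ih =>
    intro r p
    simp only [List.foldl_cons, List.foldr_cons, ih]
    cases x <;> simp <;> ring

theorem IndexBoolArray_spec : Claim_equal_IndexBoolArray := by
  intro array _
  unfold Spec_IndexBoolArray IndexBoolArray IndexBoolArray_alt
  rw [List.foldl_reverse, IndexBoolArray_loop]
  simp
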